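-- pv_equiv track=rewrite | github.com/jurek-muszynski/pipr-all | lab5-zadania/solutions_1.py | odd_sum_check
-- ===== SOURCE A (Python) =====
-- def odd_sum_check(num_list):
--     sum_odd = 0
--     sum_3_dividable = 0
--     for index in range(len(num_list)):
--         if (index + 1) % 2:
--             sum_odd += num_list[index]
--         if (index + 1) % 3 == 0:
--             sum_3_dividable += num_list[index]
--     return sum_odd > sum_3_dividable
-- ===== SOURCE B (Python) =====
-- def odd_sum_check(num_list):
--     return sum(num_list[0::2]) > sum(num_list[2::3])
-- ===== Notes on version B (the rewrite author's own statement) =====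
-- stated objective: simpler
-- what changed: Replaces the single index loop with two branch conditions and two accumulators by two independent strided-slice sums: sum(num_list[0::2]) (1-based odd positions) vs sum(num_list[2::3]) (1-based positions divisible by 3).
import Mathlib
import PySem

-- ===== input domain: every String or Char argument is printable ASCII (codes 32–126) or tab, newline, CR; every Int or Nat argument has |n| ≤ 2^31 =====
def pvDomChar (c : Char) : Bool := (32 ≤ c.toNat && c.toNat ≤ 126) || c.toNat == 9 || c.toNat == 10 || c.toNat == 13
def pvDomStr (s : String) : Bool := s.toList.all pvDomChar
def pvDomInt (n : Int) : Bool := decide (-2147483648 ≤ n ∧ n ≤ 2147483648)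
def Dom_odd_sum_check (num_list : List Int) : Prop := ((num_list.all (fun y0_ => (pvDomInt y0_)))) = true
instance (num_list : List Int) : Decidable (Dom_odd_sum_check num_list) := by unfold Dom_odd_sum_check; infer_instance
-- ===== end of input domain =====

-- B replaces A's single index loop (two accumulators, two branch conditions in one loop body)
-- by two independent strided-slice sums, sum(xs[0::2]) > sum(xs[2::3]); objective: simpler.

-- ===== PORT A =====
-- loop body of A's for-loop (the two ifs, in source order)
def oddStep (num_list : List Int) (acc : Int × Int) (index : Int) : Int × Int :=
  let acc1 := if PySem.Int.mod (index + 1) 2 ≠ 0 then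
      (acc.1 + PySem.List.pyGetD num_list index 0, acc.2) else acc
  if PySem.Int.mod (index + 1) 3 = 0 then
      (acc1.1, acc1.2 + PySem.List.pyGetD num_list index 0) else acc1

def odd_sum_check (num_list : List Int) : Bool :=
  let r := (PySem.List.pyRange 0 (PySem.List.len num_list) 1).foldl (oddStep num_list) (0, 0)
  decide (r.1 > r.2)

-- ===== PORT B =====
def odd_sum_check_alt (num_list : List Int) : Bool :=
  decide (((PySem.List.slice? num_list (some 0) none 2).getD []).sum
        > ((PySem.List.slice? num_list (some 2) none 3).getD []).sum)


-- ===== PRECONDITION & SPEC =====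
def Spec_odd_sum_check (num_list : List Int) (out : Bool) : Prop := out = odd_sum_check_alt num_list
instance (num_list : List Int) (out : Bool) : Decidable (Spec_odd_sum_check num_list out) := by unfold Spec_odd_sum_check; infer_instance

-- ===== CLAIM (what is proved, stated in full; the proofs are below) =====
def Claim_equal_odd_sum_check : Prop := ∀ (num_list : List Int), Dom_odd_sum_check num_list → Spec_odd_sum_check num_list (odd_sum_check num_list)

-- ===== LEMMAS AND PROOFS =====

-- oddP xs n / triP xs n: sum of the first n elements at even 0-based positions,
-- resp. at 0-based positions ≡ 2 (mod 3) — the common closed form of both ports.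
def oddP (xs : List Int) (n : Nat) : Int :=
  ((List.range n).map (fun i => if i % 2 = 0 then xs.getD i 0 else 0)).sum
def triP (xs : List Int) (n : Nat) : Int :=
  ((List.range n).map (fun i => if i % 3 = 2 then xs.getD i 0 else 0)).sum

lemma filterMap_eq_map_of {α β : Type} (l : List α) (f : α → Option β) (g : α → β)
    (h : ∀ x ∈ l, f x = some (g x)) : l.filterMap f = l.map g := by
  induction l with
  | nil => rfl
  | cons a t ih =>
      simp only [List.filterMap_cons, List.map_cons, h a (List.mem_cons_self),
        ih (fun x hx => h x (List.mem_cons_of_mem a hx))]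

lemma foldA (xs : List Int) (n : Nat) (s : Int × Int) :
    List.foldl (fun (acc : Int × Int) (k : Nat) => oddStep xs acc (k : Int)) s (List.range n)
      = (s.1 + oddP xs n, s.2 + triP xs n) := by
  induction n generalizing s with
  | zero => simp [oddP, triP]
  | succ n ih =>
      have hodd : oddP xs (n + 1) = oddP xs n + (if n % 2 = 0 then xs.getD n 0 else 0) := by
        unfold oddP
        rw [List.range_succ]
        simp only [List.map_append, List.map_cons, List.map_nil, List.sum_append,
          List.sum_cons, List.sum_nil, add_zero]
      have htri : triP xs (n + 1) = triP xs n + (if n % 3 = 2 then xs.getD n 0 else 0) := by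
        unfold triP
        rw [List.range_succ]
        simp only [List.map_append, List.map_cons, List.map_nil, List.sum_append,
          List.sum_cons, List.sum_nil, add_zero]
      rw [hodd, htri, List.range_succ, List.foldl_append, ih]
      simp only [List.foldl_cons, List.foldl_nil, oddStep, PySem.List.pyGetD_natCast,
        PySem.Int.mod_eq_emod_of_pos (b := 2) (by norm_num),
        PySem.Int.mod_eq_emod_of_pos (b := 3) (by norm_num)]
      simp only [show (((n : Int) + 1) % 2 ≠ 0) ↔ (n % 2 = 0) from by omega,
        show (((n : Int) + 1) % 3 = 0) ↔ (n % 3 = 2) from by omega]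
      by_cases h2 : n % 2 = 0 <;> by_cases h3 : n % 3 = 2 <;>
        simp [h2, h3, add_assoc]
lemma sliceEq2 (xs : List Int) :
    (PySem.List.slice? xs (some 0) none 2).getD []
      = (List.range ((xs.length + 1) / 2)).map (fun k => xs.getD (2 * k) 0) := by
  unfold PySem.List.slice? PySem.List.sliceIndices
  norm_num
  have hc : (if 0 < xs.length then (((xs.length : Int) + 2 - 1) / 2).toNat else 0)
      = (xs.length + 1) / 2 := by split_ifs <;> omega
  rw [hc]
  apply filterMap_eq_map_of
  intro k hk
  simp only [List.mem_range] at hk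
  have h2k : 2 * k < xs.length := by omega
  have ht : ((2 : Int) * (k : Int)).toNat = 2 * k := by omega
  rw [ht]
  simp [List.getElem?_eq_getElem h2k]

lemma sliceEq3 (xs : List Int) :
    (PySem.List.slice? xs (some 2) none 3).getD []
      = (List.range (xs.length / 3)).map (fun k => xs.getD (2 + 3 * k) 0) := by
  unfold PySem.List.slice? PySem.List.sliceIndices
  norm_num
  by_cases h : 2 < xs.length
  case neg =>
    rw [if_neg h, show xs.length / 3 = 0 from by omega]
    simp
  case pos =>
    have hmin : min (2 : Int) (xs.length : Int) = 2 := by omega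
    simp only [hmin]
    have hc : (if 2 < xs.length then (((xs.length : Int) - 2 + 3 - 1) / 3).toNat else 0)
        = xs.length / 3 := by rw [if_pos h]; omega
    rw [hc]
    apply filterMap_eq_map_of
    intro k hk
    simp only [List.mem_range] at hk
    have h3k : 2 + 3 * k < xs.length := by omega
    have ht : ((2 : Int) + 3 * (k : Int)).toNat = 2 + 3 * k := by omega
    rw [ht]
    simp [List.getElem?_eq_getElem h3k]


lemma reindex2 (g : Nat → Int) (n : Nat) :
    ((List.range ((n + 1) / 2)).map (fun k => g (2 * k))).sum
      = ((List.range n).map (fun i => if i % 2 = 0 then g i else 0)).sum := by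
  induction n with
  | zero => rfl
  | succ n ih =>
      rw [List.range_succ (n := n)]
      by_cases h : n % 2 = 0
      · have hc : (n + 1 + 1) / 2 = (n + 1) / 2 + 1 := by omega
        have hi : 2 * ((n + 1) / 2) = n := by omega
        rw [hc, List.range_succ]
        simp [ih, hi, h]
      · have hc : (n + 1 + 1) / 2 = (n + 1) / 2 := by omega
        rw [hc]
        simp [ih, h]

lemma reindex3 (g : Nat → Int) (n : Nat) :
    ((List.range (n / 3)).map (fun k => g (2 + 3 * k))).sum
      = ((List.range n).map (fun i => if i % 3 = 2 then g i else 0)).sum := by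
  induction n with
  | zero => rfl
  | succ n ih =>
      rw [List.range_succ (n := n)]
      by_cases h : n % 3 = 2
      · have hc : (n + 1) / 3 = n / 3 + 1 := by omega
        have hi : 2 + 3 * (n / 3) = n := by omega
        rw [hc, List.range_succ]
        simp [ih, hi, h]
      · have hc : (n + 1) / 3 = n / 3 := by omega
        rw [hc]
        simp [ih, h]

-- ===== VERDICT (by name: the statement is the Claim_ definition above) =====
theorem odd_sum_check_spec : Claim_equal_odd_sum_check := by
  intro xs _
  show odd_sum_check xs = odd_sum_check_alt xs
  have hA : odd_sum_check xs = decide (oddP xs xs.length > triP xs xs.length) := by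
    unfold odd_sum_check
    rw [PySem.List.len_eq, PySem.List.pyRange_zero_natCast, List.foldl_map, foldA]
    norm_num
  have hB : odd_sum_check_alt xs = decide (oddP xs xs.length > triP xs xs.length) := by
    unfold odd_sum_check_alt
    rw [sliceEq2, sliceEq3]
    have r2 := reindex2 (fun i => xs.getD i 0) xs.length
    have r3 := reindex3 (fun i => xs.getD i 0) xs.length
    simp only at r2 r3
    rw [r2, r3]
    rfl
  rw [hA, hB]
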